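-- pv_equiv track=rewrite | github.com/maklabas/elementary_tasks | elementary_tasks/lucky_ticket(Task_6)/lucky_ticket.py | check_Piter
-- ===== SOURCE A (Python) =====
-- def summ(num: str):
--     """Recursive func that returns sum of numbers in string."""
--     return int(num[0]) + summ(num[1:]) if len(num) != 0 else 0
--
-- def compare(val1, val2):
--     """Compares two params"""
--     return True if summ(val1) == summ(val2) else False
--
-- def check_Piter(number):
--     """Divides number on two parts and compares according to Piter system
--     (sum of even equals sum of odd numbers)."""
--     num_str = str(number)
--     res_odd = ''
--     res_even = ''
--     for index, item in enumerate(num_str, start=0):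
--         if index % 2 == 0:
--             res_odd = res_odd + item
--         else:
--             res_even = res_even + item
--     return compare(res_even, res_odd)
-- ===== SOURCE B (Python) =====
-- def check_Piter(number):
--     """Divides number on two parts and compares according to Piter system
--     (sum of even equals sum of odd numbers)."""
--     diff = 0
--     for index, ch in enumerate(str(number)):
--         if index % 2 == 0:
--             diff += int(ch)
--         else:
--             diff -= int(ch)
--     return diff == 0
-- ===== Notes on version B (the rewrite author's own statement) =====
-- stated objective: simpler
-- what changed: Replaces the two accumulated strings plus the recursive summ/compare helpers with one linear pass over the digits keeping a single signed-difference accumulator, returning diff == 0.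
import Mathlib
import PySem

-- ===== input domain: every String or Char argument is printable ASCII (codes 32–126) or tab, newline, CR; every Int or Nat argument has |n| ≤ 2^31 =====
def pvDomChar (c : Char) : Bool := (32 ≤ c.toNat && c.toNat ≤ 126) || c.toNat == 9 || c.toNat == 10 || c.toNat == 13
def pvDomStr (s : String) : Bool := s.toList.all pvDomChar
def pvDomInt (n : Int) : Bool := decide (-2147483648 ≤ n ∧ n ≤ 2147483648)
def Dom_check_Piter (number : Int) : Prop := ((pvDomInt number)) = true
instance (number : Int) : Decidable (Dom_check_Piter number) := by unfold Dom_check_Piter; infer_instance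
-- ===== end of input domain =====

-- B inlines the two accumulated strings and the recursive summ/compare helpers into one
-- linear pass keeping a single signed-difference accumulator (objective: simpler).

-- ===== PORT A =====
-- int(ch) for a one-character string ch (both Pythons call int on single characters);
-- inside Pre_ every character is a digit, so ofChars? returns some; .getD 0 never fires there.
def pvInt1 (c : Char) : Int := (PySem.Int.ofChars? [c]).getD 0

-- summ: recursive sum of int(ch) over the string's characters
def pvSumm (num : List Char) : Int :=
  match num with
  | [] => 0
  | c :: rest => pvInt1 c + pvSumm rest

-- compare(val1, val2) = (summ val1 == summ val2)
def pvCompare (val1 val2 : List Char) : Bool :=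
  pvSumm val1 == pvSumm val2

-- the for loop over enumerate(num_str): builds (res_odd, res_even)
def pvLoopA (cs : List Char) (index : Nat) (res_odd res_even : List Char) :
    List Char × List Char :=
  match cs with
  | [] => (res_odd, res_even)
  | item :: rest =>
      if index % 2 == 0 then pvLoopA rest (index + 1) (res_odd ++ [item]) res_even
      else pvLoopA rest (index + 1) res_odd (res_even ++ [item])

def check_Piter (number : Int) : Bool :=
  let num_str := PySem.Int.toChars number
  let (res_odd, res_even) := pvLoopA num_str 0 [] []
  pvCompare res_even res_odd

-- ===== PORT B =====
-- single pass: diff += int(ch) at even indices, diff -= int(ch) at odd indices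
def pvLoopB (cs : List Char) (index : Nat) (diff : Int) : Int :=
  match cs with
  | [] => diff
  | ch :: rest =>
      if index % 2 == 0 then pvLoopB rest (index + 1) (diff + pvInt1 ch)
      else pvLoopB rest (index + 1) (diff - pvInt1 ch)

def check_Piter_alt (number : Int) : Bool :=
  pvLoopB (PySem.Int.toChars number) 0 0 == 0

-- ===== PRECONDITION & SPEC =====
-- A raises ValueError on negative numbers (int('-') inside summ); B raises identically.
def Pre_check_Piter (number : Int) : Prop := 0 ≤ number
instance (number : Int) : Decidable (Pre_check_Piter number) := by unfold Pre_check_Piter; infer_instance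
def pvWitness_check_Piter : Int := 1230

def Spec_check_Piter (number : Int) (out : Bool) : Prop := out = check_Piter_alt number
instance (number : Int) (out : Bool) : Decidable (Spec_check_Piter number out) := by unfold Spec_check_Piter; infer_instance

-- ===== CLAIM (what is proved, stated in full; the proofs are below) =====
def Claim_equal_check_Piter : Prop := ∀ (number : Int), Dom_check_Piter number → Pre_check_Piter number → Spec_check_Piter number (check_Piter number)

-- ===== LEMMAS AND PROOFS =====

theorem pvSumm_append (a b : List Char) : pvSumm (a ++ b) = pvSumm a + pvSumm b := by
  induction a with
  | nil => simp [pvSumm]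
  | cons c rest ih => simp [pvSumm, ih]; ring

-- B's loop equals diff plus (sum of A's res_odd part) minus (sum of A's res_even part)
theorem pvLoop_rel (cs : List Char) (i : Nat) (o e : List Char) (diff : Int) :
    pvLoopB cs i diff
      = diff + (pvSumm (pvLoopA cs i o e).1 - pvSumm o)
             - (pvSumm (pvLoopA cs i o e).2 - pvSumm e) := by
  induction cs generalizing i o e diff with
  | nil => simp [pvLoopA, pvLoopB]
  | cons c rest ih =>
      by_cases h : i % 2 == 0
      · simp only [pvLoopA, pvLoopB, h, if_pos]
        rw [ih (i + 1) (o ++ [c]) e (diff + pvInt1 c), pvSumm_append]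
        simp [pvSumm]; ring
      · simp only [pvLoopA, pvLoopB, h, if_neg, Bool.false_eq_true, not_false_iff]
        rw [ih (i + 1) o (e ++ [c]) (diff - pvInt1 c), pvSumm_append]
        simp [pvSumm]; ring

-- ===== VERDICT (by name: the statement is the Claim_ definition above) =====
theorem check_Piter_spec : Claim_equal_check_Piter := by
  intro number _ _
  unfold Spec_check_Piter check_Piter check_Piter_alt pvCompare
  rw [pvLoop_rel (PySem.Int.toChars number) 0 [] [] 0]
  simp only [pvSumm]
  simp only [show ∀ a b : Int, (a == b) = decide (a = b) from fun _ _ => rfl, decide_eq_decide]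
  omega
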